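-- pv_equiv track=rewrite | github.com/Zafeer-R/8-Men-Morris | MorrisBasics.py | count_possible_moves
-- ===== SOURCE A (Python) =====
-- def count_possible_moves(board, player):
--
--     adjacency_list = {
--         0: [1,2,6],
--         1: [0,3,11],
--         2: [0,3,4,7],
--         3: [1,2,5,10],
--         4: [2,5,8],
--         5: [3,4,9],
--         6: [0,7,18],
--         7: [2,6,8,15],
--         8: [4,7,12],
--         9: [5,10,14],
--         10: [3,9,11,17],
--         11: [1,10,20],
--         12: [8,13,15],
--         13: [12,14,16],
--         14: [9,13,17],
--         15: [7,12,16,18],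
--         16: [13,15,17,19],
--         17: [10,14,16,20],
--         18: [6,15,19],
--         19: [16,18,20],
--         20: [11,17,19]
--         }
--
--     moves = 0
--     for pos, piece in enumerate(board):
--         if piece == player:
--             for neighbor in adjacency_list[pos]:
--                 if board[neighbor] == 'x':
--                     moves += 1
--     return moves
-- ===== SOURCE B (Python) =====
-- def count_possible_moves(board, player):
--
--     adjacency = [
--         [1,2,6], [0,3,11], [0,3,4,7], [1,2,5,10], [2,5,8], [3,4,9],
--         [0,7,18], [2,6,8,15], [4,7,12], [5,10,14], [3,9,11,17],
--         [1,10,20], [8,13,15], [12,14,16], [9,13,17], [7,12,16,18],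
--         [13,15,17,19], [10,14,16,20], [6,15,19], [16,18,20], [11,17,19]]
--
--     # each undirected edge once, from the (symmetric) adjacency table
--     edges = set()
--     for u, nbrs in enumerate(adjacency):
--         for v in nbrs:
--             edges.add((u, v) if u < v else (v, u))
--
--     mine = {pos for pos, piece in enumerate(board) if piece == player}
--     empty = {pos for pos, piece in enumerate(board) if piece == 'x'}
--
--     moves = 0
--     for u, v in edges:
--         if u in mine and v in empty:
--             moves += 1
--         if v in mine and u in empty:
--             moves += 1
--     return moves
-- ===== Notes on version B (the rewrite author's own statement) =====
-- stated objective: alternative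
-- what changed: Instead of scanning every cell and walking its directed neighbor list with repeated board indexing, B builds once from the (symmetric) adjacency table a set of undirected edges (each pair stored a single time as a sorted tuple) plus index sets of the player's cells and of the empty ('x') cells, then makes one pass over the edge set adding 1 for each direction whose source endpoint is the player's and whose target is empty.
-- outside the precondition, e.g. on count_possible_moves(['w', 'x', 'x', 'x', 'x', 'x', 'x'], 'w'): A returns 3, B returns 3
import Mathlib
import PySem

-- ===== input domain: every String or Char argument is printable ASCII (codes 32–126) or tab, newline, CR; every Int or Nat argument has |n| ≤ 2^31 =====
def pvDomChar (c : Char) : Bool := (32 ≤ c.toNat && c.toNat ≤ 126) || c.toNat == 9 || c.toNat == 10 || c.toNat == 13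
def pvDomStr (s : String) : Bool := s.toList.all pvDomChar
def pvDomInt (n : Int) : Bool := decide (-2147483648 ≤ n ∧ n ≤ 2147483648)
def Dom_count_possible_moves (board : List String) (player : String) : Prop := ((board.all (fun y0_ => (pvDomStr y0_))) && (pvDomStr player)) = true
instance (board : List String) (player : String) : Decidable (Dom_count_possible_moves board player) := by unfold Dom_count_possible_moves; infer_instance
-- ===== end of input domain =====

-- ===== PORT A =====
-- B re-implements A by one pass over the undirected edge set built once from the adjacency
-- table, testing endpoints against index sets of the player's and of the empty cells,
-- instead of A's per-cell scan over directed neighbor lists (objective: alternative).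
def pvAdjacency : PySem.Dict Int (List Int) :=
  PySem.Dict.ofList [(0,[1,2,6]), (1,[0,3,11]), (2,[0,3,4,7]), (3,[1,2,5,10]), (4,[2,5,8]),
    (5,[3,4,9]), (6,[0,7,18]), (7,[2,6,8,15]), (8,[4,7,12]), (9,[5,10,14]), (10,[3,9,11,17]),
    (11,[1,10,20]), (12,[8,13,15]), (13,[12,14,16]), (14,[9,13,17]), (15,[7,12,16,18]),
    (16,[13,15,17,19]), (17,[10,14,16,20]), (18,[6,15,19]), (19,[16,18,20]), (20,[11,17,19])]

def count_possible_moves (board : List String) (player : String) : Int :=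
  (PySem.List.enumerate board).foldl (fun moves pp =>
    if pp.2 == player then
      (pvAdjacency.getD pp.1 []).foldl (fun m n =>
        if PySem.List.pyGetD board n "" == "x" then m + 1 else m) moves
    else moves) 0

-- ===== PORT B =====
def pvAdjacencyB : List (List Int) :=
  [[1,2,6], [0,3,11], [0,3,4,7], [1,2,5,10], [2,5,8], [3,4,9],
   [0,7,18], [2,6,8,15], [4,7,12], [5,10,14], [3,9,11,17],
   [1,10,20], [8,13,15], [12,14,16], [9,13,17], [7,12,16,18],
   [13,15,17,19], [10,14,16,20], [6,15,19], [16,18,20], [11,17,19]]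

-- each undirected edge once, from the (symmetric) adjacency table
def pvEdges : PySem.Set (Int × Int) :=
  (PySem.List.enumerate pvAdjacencyB).foldl (fun s q =>
    q.2.foldl (fun s v => PySem.Set.add s (if q.1 < v then (q.1, v) else (v, q.1))) s)
    PySem.Set.empty

def count_possible_moves_alt (board : List String) (player : String) : Int :=
  let mine := PySem.Set.ofList (((PySem.List.enumerate board).filter (fun pp => pp.2 == player)).map (·.1))
  let empty := PySem.Set.ofList (((PySem.List.enumerate board).filter (fun pp => pp.2 == "x")).map (·.1))
  pvEdges.foldl (fun moves e =>
    let m1 := if PySem.Set.contains mine e.1 && PySem.Set.contains empty e.2 then moves + 1 else moves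
    if PySem.Set.contains mine e.2 && PySem.Set.contains empty e.1 then m1 + 1 else m1) 0

-- ===== PRECONDITION & SPEC =====
-- Pre_ admits full 21-cell boards (the game's natural domain) and any board without a piece of
-- the player (A trivially returns 0 there). On other degenerate lengths A generally raises
-- (KeyError/IndexError on a player piece's position or neighbor); where the player's pieces
-- happen to sit only at fully in-range positions A still returns, and B agrees there, but
-- those accidental shapes are left outside Pre_.
def Pre_count_possible_moves (board : List String) (player : String) : Prop :=
  board.length = 21 ∨ player ∉ board
instance (board : List String) (player : String) : Decidable (Pre_count_possible_moves board player) := by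
  unfold Pre_count_possible_moves; infer_instance

def pvWitness_count_possible_moves : List String × String :=
  (["x","w","x","","x","x","w","x","x","x","x","x","x","x","x","x","x","x","x","x","x"], "w")

def Spec_count_possible_moves (board : List String) (player : String) (out : Int) : Prop := out = count_possible_moves_alt board player
instance (board : List String) (player : String) (out : Int) : Decidable (Spec_count_possible_moves board player out) := by unfold Spec_count_possible_moves; infer_instance

-- ===== CLAIM (what is proved, stated in full; the proofs are below) =====
def Claim_equal_count_possible_moves : Prop := ∀ (board : List String) (player : String), Dom_count_possible_moves board player → Pre_count_possible_moves board player → Spec_count_possible_moves board player (count_possible_moves board player)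


-- ===== LEMMAS AND PROOFS =====

lemma pv_nest (c d : Prop) [Decidable c] [Decidable d] :
    (if c then (if d then (1:Int) else 0) else 0) = if c ∧ d then 1 else 0 := by
  split_ifs with h1 h2 h3 <;> simp_all

lemma pv_acc (c : Prop) [Decidable c] (m x : Int) :
    (if c then m + x else m) = m + (if c then x else 0) := by
  split <;> simp

lemma pv_dist (c : Prop) [Decidable c] (x y : Int) :
    (if c then x + y else 0) = (if c then x else 0) + (if c then y else 0) := by
  split <;> simp

lemma pv_mem (board : List String) (s : String) (k : Nat) (hk : k < board.length) :
    PySem.Set.contains (PySem.Set.ofList (((PySem.List.enumerate board).filter (fun pp => pp.2 == s)).map (·.1))) ((k : Nat) : Int) = (board[k] == s) := by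
  by_cases h : board[k] = s
  · have hm : ((k : Nat) : Int) ∈ (((PySem.List.enumerate board).filter (fun pp => pp.2 == s)).map (·.1)) := by
      refine List.mem_map.mpr ⟨((k : Int), board[k]), ?_, rfl⟩
      refine List.mem_filter.mpr ⟨?_, by simpa using h⟩
      exact (PySem.List.mem_enumerate_iff board 0 _).mpr ⟨k, hk, by simp⟩
    have hin : ((k : Nat) : Int) ∈ PySem.Set.ofList (((PySem.List.enumerate board).filter (fun pp => pp.2 == s)).map (·.1)) :=
      (PySem.Set.mem_ofList _ _).mpr hm
    rw [(PySem.Set.contains_iff _ _).mpr hin]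
    simp [h]
  · have hm : ((k : Nat) : Int) ∉ (((PySem.List.enumerate board).filter (fun pp => pp.2 == s)).map (·.1)) := by
      intro hmem
      rcases List.mem_map.mp hmem with ⟨pp, hpp, hfst⟩
      rcases List.mem_filter.mp hpp with ⟨hen, hcond⟩
      rcases (PySem.List.mem_enumerate_iff board 0 pp).mp hen with ⟨j, hj, rfl⟩
      simp at hfst hcond
      have : j = k := by exact_mod_cast hfst
      subst this
      exact h hcond
    have hns : ((k : Nat) : Int) ∉ PySem.Set.ofList (((PySem.List.enumerate board).filter (fun pp => pp.2 == s)).map (·.1)) := by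
      simpa [PySem.Set.mem_ofList] using hm
    have hc : PySem.Set.contains (PySem.Set.ofList (((PySem.List.enumerate board).filter (fun pp => pp.2 == s)).map (·.1))) ((k : Nat) : Int) ≠ true := by
      intro hc; exact hns ((PySem.Set.contains_iff _ _).mp hc)
    simp only [Bool.not_eq_true] at hc
    rw [hc]
    simp [h]

set_option maxRecDepth 100000 in
set_option maxHeartbeats 1000000 in
lemma pv_main (b0 b1 b2 b3 b4 b5 b6 b7 b8 b9 b10 b11 b12 b13 b14 b15 b16 b17 b18 b19 b20 p : String) :
    count_possible_moves [b0,b1,b2,b3,b4,b5,b6,b7,b8,b9,b10,b11,b12,b13,b14,b15,b16,b17,b18,b19,b20] p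
    = count_possible_moves_alt [b0,b1,b2,b3,b4,b5,b6,b7,b8,b9,b10,b11,b12,b13,b14,b15,b16,b17,b18,b19,b20] p := by
  have he : pvEdges = [(0, 1), (0, 2), (0, 6), (1, 3), (1, 11), (2, 3), (2, 4), (2, 7), (3, 5), (3, 10), (4, 5), (4, 8), (5, 9), (6, 7),
    (6, 18), (7, 8), (7, 15), (8, 12), (9, 10), (9, 14), (10, 11), (10, 17), (11, 20), (12, 13), (12, 15), (13, 14),
    (13, 16), (14, 17), (15, 16), (15, 18), (16, 17), (16, 19), (17, 20), (18, 19), (19, 20)] := by decide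
  have h0 : pvAdjacency.getD 0 [] = [1,2,6] := by decide
  have h1 : pvAdjacency.getD 1 [] = [0,3,11] := by decide
  have h2 : pvAdjacency.getD 2 [] = [0,3,4,7] := by decide
  have h3 : pvAdjacency.getD 3 [] = [1,2,5,10] := by decide
  have h4 : pvAdjacency.getD 4 [] = [2,5,8] := by decide
  have h5 : pvAdjacency.getD 5 [] = [3,4,9] := by decide
  have h6 : pvAdjacency.getD 6 [] = [0,7,18] := by decide
  have h7 : pvAdjacency.getD 7 [] = [2,6,8,15] := by decide
  have h8 : pvAdjacency.getD 8 [] = [4,7,12] := by decide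
  have h9 : pvAdjacency.getD 9 [] = [5,10,14] := by decide
  have h10 : pvAdjacency.getD 10 [] = [3,9,11,17] := by decide
  have h11 : pvAdjacency.getD 11 [] = [1,10,20] := by decide
  have h12 : pvAdjacency.getD 12 [] = [8,13,15] := by decide
  have h13 : pvAdjacency.getD 13 [] = [12,14,16] := by decide
  have h14 : pvAdjacency.getD 14 [] = [9,13,17] := by decide
  have h15 : pvAdjacency.getD 15 [] = [7,12,16,18] := by decide
  have h16 : pvAdjacency.getD 16 [] = [13,15,17,19] := by decide
  have h17 : pvAdjacency.getD 17 [] = [10,14,16,20] := by decide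
  have h18 : pvAdjacency.getD 18 [] = [6,15,19] := by decide
  have h19 : pvAdjacency.getD 19 [] = [16,18,20] := by decide
  have h20 : pvAdjacency.getD 20 [] = [11,17,19] := by decide
  simp only [count_possible_moves, count_possible_moves_alt, he]
  generalize hM : PySem.Set.ofList (((PySem.List.enumerate [b0,b1,b2,b3,b4,b5,b6,b7,b8,b9,b10,b11,b12,b13,b14,b15,b16,b17,b18,b19,b20]).filter (fun pp => pp.2 == p)).map (·.1)) = M
  generalize hX : PySem.Set.ofList (((PySem.List.enumerate [b0,b1,b2,b3,b4,b5,b6,b7,b8,b9,b10,b11,b12,b13,b14,b15,b16,b17,b18,b19,b20]).filter (fun pp => pp.2 == "x")).map (·.1)) = X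
  have m0 : PySem.Set.contains M (0 : Int) = (b0 == p) := by
    rw [← hM]; simpa using pv_mem [b0,b1,b2,b3,b4,b5,b6,b7,b8,b9,b10,b11,b12,b13,b14,b15,b16,b17,b18,b19,b20] p 0 (by simp)
  have m1 : PySem.Set.contains M (1 : Int) = (b1 == p) := by
    rw [← hM]; simpa using pv_mem [b0,b1,b2,b3,b4,b5,b6,b7,b8,b9,b10,b11,b12,b13,b14,b15,b16,b17,b18,b19,b20] p 1 (by simp)
  have m2 : PySem.Set.contains M (2 : Int) = (b2 == p) := by
    rw [← hM]; simpa using pv_mem [b0,b1,b2,b3,b4,b5,b6,b7,b8,b9,b10,b11,b12,b13,b14,b15,b16,b17,b18,b19,b20] p 2 (by simp)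
  have m3 : PySem.Set.contains M (3 : Int) = (b3 == p) := by
    rw [← hM]; simpa using pv_mem [b0,b1,b2,b3,b4,b5,b6,b7,b8,b9,b10,b11,b12,b13,b14,b15,b16,b17,b18,b19,b20] p 3 (by simp)
  have m4 : PySem.Set.contains M (4 : Int) = (b4 == p) := by
    rw [← hM]; simpa using pv_mem [b0,b1,b2,b3,b4,b5,b6,b7,b8,b9,b10,b11,b12,b13,b14,b15,b16,b17,b18,b19,b20] p 4 (by simp)
  have m5 : PySem.Set.contains M (5 : Int) = (b5 == p) := by
    rw [← hM]; simpa using pv_mem [b0,b1,b2,b3,b4,b5,b6,b7,b8,b9,b10,b11,b12,b13,b14,b15,b16,b17,b18,b19,b20] p 5 (by simp)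
  have m6 : PySem.Set.contains M (6 : Int) = (b6 == p) := by
    rw [← hM]; simpa using pv_mem [b0,b1,b2,b3,b4,b5,b6,b7,b8,b9,b10,b11,b12,b13,b14,b15,b16,b17,b18,b19,b20] p 6 (by simp)
  have m7 : PySem.Set.contains M (7 : Int) = (b7 == p) := by
    rw [← hM]; simpa using pv_mem [b0,b1,b2,b3,b4,b5,b6,b7,b8,b9,b10,b11,b12,b13,b14,b15,b16,b17,b18,b19,b20] p 7 (by simp)
  have m8 : PySem.Set.contains M (8 : Int) = (b8 == p) := by
    rw [← hM]; simpa using pv_mem [b0,b1,b2,b3,b4,b5,b6,b7,b8,b9,b10,b11,b12,b13,b14,b15,b16,b17,b18,b19,b20] p 8 (by simp)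
  have m9 : PySem.Set.contains M (9 : Int) = (b9 == p) := by
    rw [← hM]; simpa using pv_mem [b0,b1,b2,b3,b4,b5,b6,b7,b8,b9,b10,b11,b12,b13,b14,b15,b16,b17,b18,b19,b20] p 9 (by simp)
  have m10 : PySem.Set.contains M (10 : Int) = (b10 == p) := by
    rw [← hM]; simpa using pv_mem [b0,b1,b2,b3,b4,b5,b6,b7,b8,b9,b10,b11,b12,b13,b14,b15,b16,b17,b18,b19,b20] p 10 (by simp)
  have m11 : PySem.Set.contains M (11 : Int) = (b11 == p) := by
    rw [← hM]; simpa using pv_mem [b0,b1,b2,b3,b4,b5,b6,b7,b8,b9,b10,b11,b12,b13,b14,b15,b16,b17,b18,b19,b20] p 11 (by simp)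
  have m12 : PySem.Set.contains M (12 : Int) = (b12 == p) := by
    rw [← hM]; simpa using pv_mem [b0,b1,b2,b3,b4,b5,b6,b7,b8,b9,b10,b11,b12,b13,b14,b15,b16,b17,b18,b19,b20] p 12 (by simp)
  have m13 : PySem.Set.contains M (13 : Int) = (b13 == p) := by
    rw [← hM]; simpa using pv_mem [b0,b1,b2,b3,b4,b5,b6,b7,b8,b9,b10,b11,b12,b13,b14,b15,b16,b17,b18,b19,b20] p 13 (by simp)
  have m14 : PySem.Set.contains M (14 : Int) = (b14 == p) := by
    rw [← hM]; simpa using pv_mem [b0,b1,b2,b3,b4,b5,b6,b7,b8,b9,b10,b11,b12,b13,b14,b15,b16,b17,b18,b19,b20] p 14 (by simp)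
  have m15 : PySem.Set.contains M (15 : Int) = (b15 == p) := by
    rw [← hM]; simpa using pv_mem [b0,b1,b2,b3,b4,b5,b6,b7,b8,b9,b10,b11,b12,b13,b14,b15,b16,b17,b18,b19,b20] p 15 (by simp)
  have m16 : PySem.Set.contains M (16 : Int) = (b16 == p) := by
    rw [← hM]; simpa using pv_mem [b0,b1,b2,b3,b4,b5,b6,b7,b8,b9,b10,b11,b12,b13,b14,b15,b16,b17,b18,b19,b20] p 16 (by simp)
  have m17 : PySem.Set.contains M (17 : Int) = (b17 == p) := by
    rw [← hM]; simpa using pv_mem [b0,b1,b2,b3,b4,b5,b6,b7,b8,b9,b10,b11,b12,b13,b14,b15,b16,b17,b18,b19,b20] p 17 (by simp)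
  have m18 : PySem.Set.contains M (18 : Int) = (b18 == p) := by
    rw [← hM]; simpa using pv_mem [b0,b1,b2,b3,b4,b5,b6,b7,b8,b9,b10,b11,b12,b13,b14,b15,b16,b17,b18,b19,b20] p 18 (by simp)
  have m19 : PySem.Set.contains M (19 : Int) = (b19 == p) := by
    rw [← hM]; simpa using pv_mem [b0,b1,b2,b3,b4,b5,b6,b7,b8,b9,b10,b11,b12,b13,b14,b15,b16,b17,b18,b19,b20] p 19 (by simp)
  have m20 : PySem.Set.contains M (20 : Int) = (b20 == p) := by
    rw [← hM]; simpa using pv_mem [b0,b1,b2,b3,b4,b5,b6,b7,b8,b9,b10,b11,b12,b13,b14,b15,b16,b17,b18,b19,b20] p 20 (by simp)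
  have x0 : PySem.Set.contains X (0 : Int) = (b0 == "x") := by
    rw [← hX]; simpa using pv_mem [b0,b1,b2,b3,b4,b5,b6,b7,b8,b9,b10,b11,b12,b13,b14,b15,b16,b17,b18,b19,b20] "x" 0 (by simp)
  have x1 : PySem.Set.contains X (1 : Int) = (b1 == "x") := by
    rw [← hX]; simpa using pv_mem [b0,b1,b2,b3,b4,b5,b6,b7,b8,b9,b10,b11,b12,b13,b14,b15,b16,b17,b18,b19,b20] "x" 1 (by simp)
  have x2 : PySem.Set.contains X (2 : Int) = (b2 == "x") := by
    rw [← hX]; simpa using pv_mem [b0,b1,b2,b3,b4,b5,b6,b7,b8,b9,b10,b11,b12,b13,b14,b15,b16,b17,b18,b19,b20] "x" 2 (by simp)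
  have x3 : PySem.Set.contains X (3 : Int) = (b3 == "x") := by
    rw [← hX]; simpa using pv_mem [b0,b1,b2,b3,b4,b5,b6,b7,b8,b9,b10,b11,b12,b13,b14,b15,b16,b17,b18,b19,b20] "x" 3 (by simp)
  have x4 : PySem.Set.contains X (4 : Int) = (b4 == "x") := by
    rw [← hX]; simpa using pv_mem [b0,b1,b2,b3,b4,b5,b6,b7,b8,b9,b10,b11,b12,b13,b14,b15,b16,b17,b18,b19,b20] "x" 4 (by simp)
  have x5 : PySem.Set.contains X (5 : Int) = (b5 == "x") := by
    rw [← hX]; simpa using pv_mem [b0,b1,b2,b3,b4,b5,b6,b7,b8,b9,b10,b11,b12,b13,b14,b15,b16,b17,b18,b19,b20] "x" 5 (by simp)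
  have x6 : PySem.Set.contains X (6 : Int) = (b6 == "x") := by
    rw [← hX]; simpa using pv_mem [b0,b1,b2,b3,b4,b5,b6,b7,b8,b9,b10,b11,b12,b13,b14,b15,b16,b17,b18,b19,b20] "x" 6 (by simp)
  have x7 : PySem.Set.contains X (7 : Int) = (b7 == "x") := by
    rw [← hX]; simpa using pv_mem [b0,b1,b2,b3,b4,b5,b6,b7,b8,b9,b10,b11,b12,b13,b14,b15,b16,b17,b18,b19,b20] "x" 7 (by simp)
  have x8 : PySem.Set.contains X (8 : Int) = (b8 == "x") := by
    rw [← hX]; simpa using pv_mem [b0,b1,b2,b3,b4,b5,b6,b7,b8,b9,b10,b11,b12,b13,b14,b15,b16,b17,b18,b19,b20] "x" 8 (by simp)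
  have x9 : PySem.Set.contains X (9 : Int) = (b9 == "x") := by
    rw [← hX]; simpa using pv_mem [b0,b1,b2,b3,b4,b5,b6,b7,b8,b9,b10,b11,b12,b13,b14,b15,b16,b17,b18,b19,b20] "x" 9 (by simp)
  have x10 : PySem.Set.contains X (10 : Int) = (b10 == "x") := by
    rw [← hX]; simpa using pv_mem [b0,b1,b2,b3,b4,b5,b6,b7,b8,b9,b10,b11,b12,b13,b14,b15,b16,b17,b18,b19,b20] "x" 10 (by simp)
  have x11 : PySem.Set.contains X (11 : Int) = (b11 == "x") := by
    rw [← hX]; simpa using pv_mem [b0,b1,b2,b3,b4,b5,b6,b7,b8,b9,b10,b11,b12,b13,b14,b15,b16,b17,b18,b19,b20] "x" 11 (by simp)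
  have x12 : PySem.Set.contains X (12 : Int) = (b12 == "x") := by
    rw [← hX]; simpa using pv_mem [b0,b1,b2,b3,b4,b5,b6,b7,b8,b9,b10,b11,b12,b13,b14,b15,b16,b17,b18,b19,b20] "x" 12 (by simp)
  have x13 : PySem.Set.contains X (13 : Int) = (b13 == "x") := by
    rw [← hX]; simpa using pv_mem [b0,b1,b2,b3,b4,b5,b6,b7,b8,b9,b10,b11,b12,b13,b14,b15,b16,b17,b18,b19,b20] "x" 13 (by simp)
  have x14 : PySem.Set.contains X (14 : Int) = (b14 == "x") := by
    rw [← hX]; simpa using pv_mem [b0,b1,b2,b3,b4,b5,b6,b7,b8,b9,b10,b11,b12,b13,b14,b15,b16,b17,b18,b19,b20] "x" 14 (by simp)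
  have x15 : PySem.Set.contains X (15 : Int) = (b15 == "x") := by
    rw [← hX]; simpa using pv_mem [b0,b1,b2,b3,b4,b5,b6,b7,b8,b9,b10,b11,b12,b13,b14,b15,b16,b17,b18,b19,b20] "x" 15 (by simp)
  have x16 : PySem.Set.contains X (16 : Int) = (b16 == "x") := by
    rw [← hX]; simpa using pv_mem [b0,b1,b2,b3,b4,b5,b6,b7,b8,b9,b10,b11,b12,b13,b14,b15,b16,b17,b18,b19,b20] "x" 16 (by simp)
  have x17 : PySem.Set.contains X (17 : Int) = (b17 == "x") := by
    rw [← hX]; simpa using pv_mem [b0,b1,b2,b3,b4,b5,b6,b7,b8,b9,b10,b11,b12,b13,b14,b15,b16,b17,b18,b19,b20] "x" 17 (by simp)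
  have x18 : PySem.Set.contains X (18 : Int) = (b18 == "x") := by
    rw [← hX]; simpa using pv_mem [b0,b1,b2,b3,b4,b5,b6,b7,b8,b9,b10,b11,b12,b13,b14,b15,b16,b17,b18,b19,b20] "x" 18 (by simp)
  have x19 : PySem.Set.contains X (19 : Int) = (b19 == "x") := by
    rw [← hX]; simpa using pv_mem [b0,b1,b2,b3,b4,b5,b6,b7,b8,b9,b10,b11,b12,b13,b14,b15,b16,b17,b18,b19,b20] "x" 19 (by simp)
  have x20 : PySem.Set.contains X (20 : Int) = (b20 == "x") := by
    rw [← hX]; simpa using pv_mem [b0,b1,b2,b3,b4,b5,b6,b7,b8,b9,b10,b11,b12,b13,b14,b15,b16,b17,b18,b19,b20] "x" 20 (by simp)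
  simp only [pv_acc, PySem.List.foldl_add]
  simp only [add_assoc]
  simp only [PySem.List.foldl_add]
  simp only [PySem.List.enumerate_cons, PySem.List.enumerate_nil,
    h0,h1,h2,h3,h4,h5,h6,h7,h8,h9,h10,h11,h12,h13,h14,h15,h16,h17,h18,h19,h20,
    List.map_cons, List.map_nil, List.sum_cons, List.sum_nil, Int.reduceAdd]
  simp only [m0,m1,m2,m3,m4,m5,m6,m7,m8,m9,m10,m11,m12,m13,m14,m15,m16,m17,m18,m19,m20]
  simp only [x0,x1,x2,x3,x4,x5,x6,x7,x8,x9,x10,x11,x12,x13,x14,x15,x16,x17,x18,x19,x20]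
  have g0 : PySem.List.pyGetD [b0,b1,b2,b3,b4,b5,b6,b7,b8,b9,b10,b11,b12,b13,b14,b15,b16,b17,b18,b19,b20] (0:Int) "" = b0 := rfl
  have g1 : PySem.List.pyGetD [b0,b1,b2,b3,b4,b5,b6,b7,b8,b9,b10,b11,b12,b13,b14,b15,b16,b17,b18,b19,b20] (1:Int) "" = b1 := rfl
  have g2 : PySem.List.pyGetD [b0,b1,b2,b3,b4,b5,b6,b7,b8,b9,b10,b11,b12,b13,b14,b15,b16,b17,b18,b19,b20] (2:Int) "" = b2 := rfl
  have g3 : PySem.List.pyGetD [b0,b1,b2,b3,b4,b5,b6,b7,b8,b9,b10,b11,b12,b13,b14,b15,b16,b17,b18,b19,b20] (3:Int) "" = b3 := rfl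
  have g4 : PySem.List.pyGetD [b0,b1,b2,b3,b4,b5,b6,b7,b8,b9,b10,b11,b12,b13,b14,b15,b16,b17,b18,b19,b20] (4:Int) "" = b4 := rfl
  have g5 : PySem.List.pyGetD [b0,b1,b2,b3,b4,b5,b6,b7,b8,b9,b10,b11,b12,b13,b14,b15,b16,b17,b18,b19,b20] (5:Int) "" = b5 := rfl
  have g6 : PySem.List.pyGetD [b0,b1,b2,b3,b4,b5,b6,b7,b8,b9,b10,b11,b12,b13,b14,b15,b16,b17,b18,b19,b20] (6:Int) "" = b6 := rfl
  have g7 : PySem.List.pyGetD [b0,b1,b2,b3,b4,b5,b6,b7,b8,b9,b10,b11,b12,b13,b14,b15,b16,b17,b18,b19,b20] (7:Int) "" = b7 := rfl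
  have g8 : PySem.List.pyGetD [b0,b1,b2,b3,b4,b5,b6,b7,b8,b9,b10,b11,b12,b13,b14,b15,b16,b17,b18,b19,b20] (8:Int) "" = b8 := rfl
  have g9 : PySem.List.pyGetD [b0,b1,b2,b3,b4,b5,b6,b7,b8,b9,b10,b11,b12,b13,b14,b15,b16,b17,b18,b19,b20] (9:Int) "" = b9 := rfl
  have g10 : PySem.List.pyGetD [b0,b1,b2,b3,b4,b5,b6,b7,b8,b9,b10,b11,b12,b13,b14,b15,b16,b17,b18,b19,b20] (10:Int) "" = b10 := rfl
  have g11 : PySem.List.pyGetD [b0,b1,b2,b3,b4,b5,b6,b7,b8,b9,b10,b11,b12,b13,b14,b15,b16,b17,b18,b19,b20] (11:Int) "" = b11 := rfl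
  have g12 : PySem.List.pyGetD [b0,b1,b2,b3,b4,b5,b6,b7,b8,b9,b10,b11,b12,b13,b14,b15,b16,b17,b18,b19,b20] (12:Int) "" = b12 := rfl
  have g13 : PySem.List.pyGetD [b0,b1,b2,b3,b4,b5,b6,b7,b8,b9,b10,b11,b12,b13,b14,b15,b16,b17,b18,b19,b20] (13:Int) "" = b13 := rfl
  have g14 : PySem.List.pyGetD [b0,b1,b2,b3,b4,b5,b6,b7,b8,b9,b10,b11,b12,b13,b14,b15,b16,b17,b18,b19,b20] (14:Int) "" = b14 := rfl
  have g15 : PySem.List.pyGetD [b0,b1,b2,b3,b4,b5,b6,b7,b8,b9,b10,b11,b12,b13,b14,b15,b16,b17,b18,b19,b20] (15:Int) "" = b15 := rfl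
  have g16 : PySem.List.pyGetD [b0,b1,b2,b3,b4,b5,b6,b7,b8,b9,b10,b11,b12,b13,b14,b15,b16,b17,b18,b19,b20] (16:Int) "" = b16 := rfl
  have g17 : PySem.List.pyGetD [b0,b1,b2,b3,b4,b5,b6,b7,b8,b9,b10,b11,b12,b13,b14,b15,b16,b17,b18,b19,b20] (17:Int) "" = b17 := rfl
  have g18 : PySem.List.pyGetD [b0,b1,b2,b3,b4,b5,b6,b7,b8,b9,b10,b11,b12,b13,b14,b15,b16,b17,b18,b19,b20] (18:Int) "" = b18 := rfl
  have g19 : PySem.List.pyGetD [b0,b1,b2,b3,b4,b5,b6,b7,b8,b9,b10,b11,b12,b13,b14,b15,b16,b17,b18,b19,b20] (19:Int) "" = b19 := rfl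
  have g20 : PySem.List.pyGetD [b0,b1,b2,b3,b4,b5,b6,b7,b8,b9,b10,b11,b12,b13,b14,b15,b16,b17,b18,b19,b20] (20:Int) "" = b20 := rfl
  simp only [g0,g1,g2,g3,g4,g5,g6,g7,g8,g9,g10,g11,g12,g13,g14,g15,g16,g17,g18,g19,g20]
  simp only [Bool.and_eq_true, beq_iff_eq]
  simp only [pv_dist, pv_nest, add_assoc, add_zero, zero_add]
  ring_nf

lemma pvA_enum_skip (board : List String) (player : String) :
    ∀ (l : List String), (∀ x ∈ l, x ≠ player) → ∀ (s : Int) (acc : Int),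
      (PySem.List.enumerate l s).foldl (fun moves pp =>
        if pp.2 == player then
          (pvAdjacency.getD pp.1 []).foldl (fun m n =>
            if PySem.List.pyGetD board n "" == "x" then m + 1 else m) moves
        else moves) acc = acc := by
  intro l
  induction l with
  | nil => intro _ s acc; simp [PySem.List.enumerate_nil]
  | cons x t ih =>
    intro hl s acc
    rw [PySem.List.enumerate_cons, List.foldl_cons]
    have hx : (x == player) = false := by
      simp only [beq_eq_false_iff_ne]; exact hl x (by simp)
    simp only [hx]
    exact ih (fun y hy => hl y (by simp [hy])) (s + 1) acc

lemma pvA_zero (board : List String) (player : String) (h : player ∉ board) :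
    count_possible_moves board player = 0 := by
  unfold count_possible_moves
  exact pvA_enum_skip board player board (fun x hx hxe => h (hxe ▸ hx)) 0 0

lemma pvB_zero (board : List String) (player : String) (h : player ∉ board) :
    count_possible_moves_alt board player = 0 := by
  unfold count_possible_moves_alt
  have hf : (PySem.List.enumerate board).filter (fun pp => pp.2 == player) = [] := by
    refine List.filter_eq_nil_iff.mpr ?_
    intro pp hpp
    rcases (PySem.List.mem_enumerate_iff board 0 pp).mp hpp with ⟨j, hj, rfl⟩
    simp only [beq_eq_false_iff_ne, ne_eq, Bool.not_eq_true, beq_eq_false_iff_ne]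
    intro he
    exact h (he ▸ List.getElem_mem hj)
  rw [hf]
  simp only [List.map_nil, PySem.Set.ofList_nil, PySem.Set.contains_eq_listContains,
    List.contains_nil, Bool.false_and, Bool.false_eq_true, if_false]
  exact PySem.List.foldl_ignore pvEdges 0

-- ===== VERDICT (by name: the statement is the Claim_ definition above) =====
theorem count_possible_moves_spec : Claim_equal_count_possible_moves := by
  intro board player _ hpre
  unfold Spec_count_possible_moves
  unfold Pre_count_possible_moves at hpre
  rcases hpre with hlen | hnm
  · obtain ⟨b0, board, rfl⟩ : ∃ x t, board = x :: t := by
      cases board with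
      | nil => simp at hlen
      | cons x t => exact ⟨x, t, rfl⟩
    obtain ⟨b1, board, rfl⟩ : ∃ x t, board = x :: t := by
      cases board with
      | nil => simp at hlen
      | cons x t => exact ⟨x, t, rfl⟩
    obtain ⟨b2, board, rfl⟩ : ∃ x t, board = x :: t := by
      cases board with
      | nil => simp at hlen
      | cons x t => exact ⟨x, t, rfl⟩
    obtain ⟨b3, board, rfl⟩ : ∃ x t, board = x :: t := by
      cases board with
      | nil => simp at hlen
      | cons x t => exact ⟨x, t, rfl⟩
    obtain ⟨b4, board, rfl⟩ : ∃ x t, board = x :: t := by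
      cases board with
      | nil => simp at hlen
      | cons x t => exact ⟨x, t, rfl⟩
    obtain ⟨b5, board, rfl⟩ : ∃ x t, board = x :: t := by
      cases board with
      | nil => simp at hlen
      | cons x t => exact ⟨x, t, rfl⟩
    obtain ⟨b6, board, rfl⟩ : ∃ x t, board = x :: t := by
      cases board with
      | nil => simp at hlen
      | cons x t => exact ⟨x, t, rfl⟩
    obtain ⟨b7, board, rfl⟩ : ∃ x t, board = x :: t := by
      cases board with
      | nil => simp at hlen
      | cons x t => exact ⟨x, t, rfl⟩
    obtain ⟨b8, board, rfl⟩ : ∃ x t, board = x :: t := by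
      cases board with
      | nil => simp at hlen
      | cons x t => exact ⟨x, t, rfl⟩
    obtain ⟨b9, board, rfl⟩ : ∃ x t, board = x :: t := by
      cases board with
      | nil => simp at hlen
      | cons x t => exact ⟨x, t, rfl⟩
    obtain ⟨b10, board, rfl⟩ : ∃ x t, board = x :: t := by
      cases board with
      | nil => simp at hlen
      | cons x t => exact ⟨x, t, rfl⟩
    obtain ⟨b11, board, rfl⟩ : ∃ x t, board = x :: t := by
      cases board with
      | nil => simp at hlen
      | cons x t => exact ⟨x, t, rfl⟩
    obtain ⟨b12, board, rfl⟩ : ∃ x t, board = x :: t := by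
      cases board with
      | nil => simp at hlen
      | cons x t => exact ⟨x, t, rfl⟩
    obtain ⟨b13, board, rfl⟩ : ∃ x t, board = x :: t := by
      cases board with
      | nil => simp at hlen
      | cons x t => exact ⟨x, t, rfl⟩
    obtain ⟨b14, board, rfl⟩ : ∃ x t, board = x :: t := by
      cases board with
      | nil => simp at hlen
      | cons x t => exact ⟨x, t, rfl⟩
    obtain ⟨b15, board, rfl⟩ : ∃ x t, board = x :: t := by
      cases board with
      | nil => simp at hlen
      | cons x t => exact ⟨x, t, rfl⟩
    obtain ⟨b16, board, rfl⟩ : ∃ x t, board = x :: t := by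
      cases board with
      | nil => simp at hlen
      | cons x t => exact ⟨x, t, rfl⟩
    obtain ⟨b17, board, rfl⟩ : ∃ x t, board = x :: t := by
      cases board with
      | nil => simp at hlen
      | cons x t => exact ⟨x, t, rfl⟩
    obtain ⟨b18, board, rfl⟩ : ∃ x t, board = x :: t := by
      cases board with
      | nil => simp at hlen
      | cons x t => exact ⟨x, t, rfl⟩
    obtain ⟨b19, board, rfl⟩ : ∃ x t, board = x :: t := by
      cases board with
      | nil => simp at hlen
      | cons x t => exact ⟨x, t, rfl⟩
    obtain ⟨b20, board, rfl⟩ : ∃ x t, board = x :: t := by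
      cases board with
      | nil => simp at hlen
      | cons x t => exact ⟨x, t, rfl⟩
    have hnil : board = [] := by
      simp only [List.length_cons] at hlen
      exact List.eq_nil_of_length_eq_zero (by omega)
    subst hnil
    exact pv_main b0 b1 b2 b3 b4 b5 b6 b7 b8 b9 b10 b11 b12 b13 b14 b15 b16 b17 b18 b19 b20 player
  · rw [pvA_zero board player hnm, pvB_zero board player hnm]
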